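-- pv_equiv track=rewrite | github.com/GIL-UNAM/Alineamiento-Biblias | ProgramaPares/lcc.py | lcc_ultimo
-- ===== SOURCE A (Python) =====
-- def lcc_ultimo(tipo_par):
--     """
--     Calcular el lcc del ultimo elemento, ya que no puede cumplir con la condición de frontera
--     """
--     lcc = 0
--     if tipo_par[-1] != 'C':
--         return int (0)
--     else:
--         lcc += 1
--         n = 2
--         while  n < len(tipo_par) and tipo_par[-n] == 'I':
--             n += 1
--             lcc += 1
--         return lcc
-- ===== SOURCE B (Python) =====
-- def lcc_ultimo(tipo_par):
--     if tipo_par[-1] != 'C':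
--         return 0
--     m = tipo_par[1:-1]
--     return 1 + len(m) - len(m.rstrip('I'))
-- ===== Notes on version B (the rewrite author's own statement) =====
-- stated objective: simpler
-- what changed: Replaces the backward while-loop with negative indexing and an accumulator by taking the middle slice and computing the trailing run length as the length difference before and after a right-strip; Pre_ excludes only the empty string, on which A raises IndexError.
import Mathlib
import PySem

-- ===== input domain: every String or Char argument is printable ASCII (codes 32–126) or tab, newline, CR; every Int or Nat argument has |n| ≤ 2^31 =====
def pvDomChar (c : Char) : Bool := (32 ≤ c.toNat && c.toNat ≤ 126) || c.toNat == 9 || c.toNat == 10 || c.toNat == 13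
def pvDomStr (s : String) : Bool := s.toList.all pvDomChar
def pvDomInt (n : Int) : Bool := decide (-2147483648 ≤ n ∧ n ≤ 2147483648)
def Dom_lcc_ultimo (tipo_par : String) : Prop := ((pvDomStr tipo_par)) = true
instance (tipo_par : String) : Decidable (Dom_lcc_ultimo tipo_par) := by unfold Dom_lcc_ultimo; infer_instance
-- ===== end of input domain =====

-- B replaces A's backward while-loop by a slice plus rstrip('I') length difference (objective: simpler).


-- ===== PORT A =====
-- the while loop: while n < len(tipo_par) and tipo_par[-n] == 'I': n += 1; lcc += 1
def lccLoopA (l : List Char) (n : Nat) (lcc : Int) : Int :=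
  if h : n < l.length ∧ PySem.List.pyGet? l (-(n : Int)) = some 'I' then
    lccLoopA l (n + 1) (lcc + 1)
  else
    lcc
termination_by l.length - n

def lcc_ultimo (tipo_par : String) : Int :=
  let l := tipo_par.toList
  if PySem.List.pyGet? l (-1) ≠ some 'C' then 0
  else lccLoopA l 2 1

-- ===== PORT B =====
def lcc_ultimo_alt (tipo_par : String) : Int :=
  let l := tipo_par.toList
  if PySem.List.pyGet? l (-1) ≠ some 'C' then 0
  else
    let m := PySem.List.slice l (some 1) (some (-1))          -- tipo_par[1:-1]
    -- m.rstrip('I'): drop 'I' characters from the right end (exact for this single strip char)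
    let r := (m.reverse.dropWhile (· == 'I')).reverse
    1 + ((m.length : Int) - (r.length : Int))

-- ===== PRECONDITION & SPEC =====
-- Pre_ excludes only the empty string, on which A's tipo_par[-1] raises IndexError.
def Pre_lcc_ultimo (tipo_par : String) : Prop := tipo_par ≠ ""
instance (tipo_par : String) : Decidable (Pre_lcc_ultimo tipo_par) := by unfold Pre_lcc_ultimo; infer_instance
def pvWitness_lcc_ultimo : String := "IIC"

def Spec_lcc_ultimo (tipo_par : String) (out : Int) : Prop := out = lcc_ultimo_alt tipo_par
instance (tipo_par : String) (out : Int) : Decidable (Spec_lcc_ultimo tipo_par out) := by unfold Spec_lcc_ultimo; infer_instance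

-- ===== CLAIM (what is proved, stated in full; the proofs are below) =====
def Claim_equal_lcc_ultimo : Prop := ∀ (tipo_par : String), Dom_lcc_ultimo tipo_par → Pre_lcc_ultimo tipo_par → Spec_lcc_ultimo tipo_par (lcc_ultimo tipo_par)

-- ===== LEMMAS AND PROOFS =====

-- A's loop counts the run of 'I's read backwards through the reversed list.
theorem lccLoopA_eq (l : List Char) (n : Nat) (lcc : Int) (hn : 1 ≤ n) :
    lccLoopA l n lcc =
      lcc + (((l.reverse.drop (n - 1)).take (l.length - n)).takeWhile (· == 'I')).length := by
  by_cases hL : n < l.length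
  · have h1 : n - 1 < l.reverse.length := by simp; omega
    have hidx : (l.reverse.drop (n - 1)).take (l.length - n)
        = l.reverse[n - 1]'h1 :: ((l.reverse.drop n).take (l.length - (n + 1))) := by
      rw [List.drop_eq_getElem_cons h1]
      have heq : n - 1 + 1 = n := by omega
      have h2 : l.length - n = (l.length - (n + 1)) + 1 := by omega
      rw [heq, h2, List.take_succ_cons]
    have hget : PySem.List.pyGet? l (-(n : Int)) = l[l.length - n]? :=
      PySem.List.pyGet?_neg_natCast l n (by omega) (by omega)
    have hrl : l.reverse[n - 1]'h1 = l[l.length - n]'(by omega) := by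
      rw [List.getElem_reverse]; congr 1; omega
    by_cases hI : l[l.length - n]'(by omega) = 'I'
    · rw [lccLoopA]
      rw [dif_pos ⟨hL, by rw [hget, List.getElem?_eq_getElem (by omega), hI]⟩]
      rw [lccLoopA_eq l (n + 1) (lcc + 1) (by omega)]
      rw [hidx, List.takeWhile_cons]
      simp [hrl, hI]
      omega
    · rw [lccLoopA]
      rw [dif_neg (by
        rintro ⟨-, hg⟩
        rw [hget, List.getElem?_eq_getElem (by omega)] at hg
        exact hI (Option.some.injEq _ _ ▸ hg))]
      rw [hidx, List.takeWhile_cons]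
      simp [hrl, hI]
  · rw [lccLoopA]
    rw [dif_neg (by rintro ⟨h, -⟩; omega)]
    have h0 : l.length - n = 0 := by omega
    simp [h0]
termination_by l.length - n

-- the middle slice, reversed, is the reversed list with its first and last element removed
theorem middle_reverse (l : List Char) :
    (((l.drop 1).take (l.length - 2))).reverse = (l.reverse.drop 1).take (l.length - 2) := by
  apply List.ext_getElem
  · simp
  · intro i h1 h2
    simp only [List.length_reverse, List.length_take, List.length_drop] at h1 h2
    simp only [List.getElem_reverse, List.getElem_take, List.getElem_drop,
      List.length_take, List.length_drop]
    congr 1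
    omega

theorem slice_middle (l : List Char) (hl : l ≠ []) :
    PySem.List.slice l (some 1) (some (-1)) = (l.drop 1).take (l.length - 2) := by
  have h1 : PySem.List.clampIdx l.length (-1) = l.length - 1 := PySem.List.clampIdx_neg_one l.length
  have h0 : PySem.List.clampIdx l.length 1 = min 1 l.length := PySem.List.clampIdx_natCast l.length 1
  have hL : 1 ≤ l.length := List.length_pos_iff.mpr hl
  simp only [PySem.List.slice, h1, h0]
  have hmin : min 1 l.length = 1 := by omega
  rw [hmin]
  have h2 : l.length - 1 - 1 = l.length - 2 := by omega
  rw [h2]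

theorem dropWhile_length {α : Type} (p : α → Bool) (xs : List α) :
    (xs.dropWhile p).length = xs.length - (xs.takeWhile p).length := by
  have h := congrArg List.length (List.takeWhile_append_dropWhile (p := p) (l := xs))
  simp only [List.length_append] at h
  omega

-- ===== VERDICT (by name: the statement is the Claim_ definition above) =====
theorem lcc_ultimo_spec : Claim_equal_lcc_ultimo := by
  intro s _ hpre
  unfold Spec_lcc_ultimo lcc_ultimo lcc_ultimo_alt
  have hlne : s.toList ≠ [] := fun h => hpre (String.toList_eq_nil_iff.mp h)
  by_cases hc : PySem.List.pyGet? s.toList (-1) ≠ some 'C'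
  · simp only [if_pos hc]
  · simp only [if_neg hc]
    rw [lccLoopA_eq s.toList 2 1 (by omega)]
    have h21 : (2:Nat) - 1 = 1 := rfl
    rw [h21]
    rw [slice_middle s.toList hlne]
    simp only [List.length_reverse]
    rw [dropWhile_length]
    have hle : (((s.toList.drop 1).take (s.toList.length - 2)).reverse.takeWhile
        (· == 'I')).length ≤ ((s.toList.drop 1).take (s.toList.length - 2)).reverse.length :=
      (List.takeWhile_prefix _).length_le
    rw [middle_reverse s.toList] at *
    simp only [List.length_take, List.length_drop, List.length_reverse] at *
    push_cast
    omega
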